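-- pv_equiv track=rewrite | github.com/chsoares/penumbra | penumbra/ps/rename.py | _build_protected_regions
-- ===== SOURCE A (Python) =====
-- from typing import NamedTuple
--
-- class _Region(NamedTuple):
--     start: int
--     end: int
--
-- def _build_protected_regions(source: str) -> list[_Region]:
--     """Build sorted list of intervals that must not be modified.
--
--     Covers: single-quoted strings, double-quoted strings, block comments, line comments.
--     """
--     regions: list[_Region] = []
--
--     i = 0
--     length = len(source)
--     while i < length:
--         ch = source[i]
--
--         # Block comment <# ... #>
--         if ch == "<" and i + 1 < length and source[i + 1] == "#":
--             end = source.find("#>", i + 2)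
--             if end == -1:
--                 end = length
--             else:
--                 end += 2
--             regions.append(_Region(i, end))
--             i = end
--             continue
--
--         # Line comment
--         if ch == "#":
--             end = source.find("\n", i)
--             if end == -1:
--                 end = length
--             regions.append(_Region(i, end))
--             i = end
--             continue
--
--         # Single-quoted string
--         if ch == "'":
--             j = i + 1
--             while j < length:
--                 if source[j] == "'" and j + 1 < length and source[j + 1] == "'":
--                     j += 2  # escaped ''
--                 elif source[j] == "'":
--                     j += 1
--                     break
--                 else:
--                     j += 1
--             else:
--                 j = length
--             regions.append(_Region(i, j))
--             i = j
--             continue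
--
--         # Double-quoted string (skip for MVP)
--         if ch == '"':
--             j = i + 1
--             while j < length:
--                 if source[j] == "`" and j + 1 < length:
--                     j += 2  # backtick escape
--                 elif source[j] == '"':
--                     j += 1
--                     break
--                 else:
--                     j += 1
--             else:
--                 j = length
--             regions.append(_Region(i, j))
--             i = j
--             continue
--
--         i += 1
--
--     regions.sort(key=lambda r: r.start)
--     return regions
-- ===== SOURCE B (Python) =====
-- from typing import NamedTuple
--
--
-- class _Region(NamedTuple):
--     start: int
--     end: int
--
--
-- # One-pass DFA over the characters: states for normal text, a pending '<',
-- # line comments, block comments (with a pending '#'), single-quoted strings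
-- # (with a pending closing quote) and double-quoted strings (with a pending
-- # backtick escape).  Regions are emitted left-to-right, already sorted.
-- _NORMAL, _SAW_LT, _LINE, _BLOCK, _BLOCK_HASH, _SINGLE, _SQUOTE, _DOUBLE, _TICK = range(9)
--
--
-- def _nstep(c: str, pos: int):
--     """Dispatch one character seen in normal text: (new state, region start)."""
--     if c == "<":
--         return _SAW_LT, pos
--     if c == "#":
--         return _LINE, pos
--     if c == "'":
--         return _SINGLE, pos
--     if c == '"':
--         return _DOUBLE, pos
--     return _NORMAL, 0
--
--
-- def _build_protected_regions(source: str) -> list[_Region]: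
--     regions: list[_Region] = []
--     state, start = _NORMAL, 0
--     for pos, c in enumerate(source):
--         if state == _NORMAL:
--             state, start = _nstep(c, pos)
--         elif state == _SAW_LT:
--             if c == "#":
--                 state = _BLOCK          # block comment started at start
--             else:
--                 state, start = _nstep(c, pos)
--         elif state == _LINE:
--             if c == "\n":
--                 regions.append(_Region(start, pos))
--                 state, start = _nstep(c, pos)
--         elif state == _BLOCK:
--             if c == "#":
--                 state = _BLOCK_HASH
--         elif state == _BLOCK_HASH:
--             if c == ">":
--                 regions.append(_Region(start, pos + 1))
--                 state = _NORMAL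
--             elif c != "#":
--                 state = _BLOCK
--         elif state == _SINGLE:
--             if c == "'":
--                 state = _SQUOTE
--         elif state == _SQUOTE:
--             if c == "'":
--                 state = _SINGLE         # escaped ''
--             else:
--                 regions.append(_Region(start, pos))
--                 state, start = _nstep(c, pos)
--         elif state == _DOUBLE:
--             if c == "`":
--                 state = _TICK
--             elif c == '"':
--                 regions.append(_Region(start, pos + 1))
--                 state = _NORMAL
--         else:  # _TICK: the character after a backtick is escaped
--             state = _DOUBLE
--     if state not in (_NORMAL, _SAW_LT):
--         regions.append(_Region(start, len(source)))
--     return regions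
-- ===== Notes on version B (the rewrite author's own statement) =====
-- stated objective: alternative
-- what changed: Replaced A's index-jumping while loop (str.find for comment ends plus two nested index-advancing scanning loops, followed by a sort) with a single left-to-right character state machine (DFA with states for pending '<', line/block comments, quoted strings and their escape lookahead) that emits regions already in order, so no final sort is needed.
import Mathlib
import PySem

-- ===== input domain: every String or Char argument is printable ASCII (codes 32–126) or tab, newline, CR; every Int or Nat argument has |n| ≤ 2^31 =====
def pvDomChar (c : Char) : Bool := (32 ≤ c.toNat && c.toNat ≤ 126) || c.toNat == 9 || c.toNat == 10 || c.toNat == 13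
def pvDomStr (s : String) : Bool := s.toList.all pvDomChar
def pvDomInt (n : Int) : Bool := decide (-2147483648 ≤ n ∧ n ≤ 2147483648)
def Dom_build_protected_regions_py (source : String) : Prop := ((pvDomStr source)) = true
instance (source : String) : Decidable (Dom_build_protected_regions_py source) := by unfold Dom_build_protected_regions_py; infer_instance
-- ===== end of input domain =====

-- B replaces A's index-jumping while loop (with str.find and two nested scanning
-- loops) by a single one-pass character state machine; objective: alternative
-- (same asymptotic cost, one uniform pass, no final sort needed).

-- ===== PORT A =====
-- A's end computation for a block comment: end = source.find("#>", k); -1 maps to length, else +2.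
def pvBlkEnd (cs : List Char) (k : Nat) : Nat :=
  if PySem.Chars.findFrom cs ['#', '>'] (k : Int) = -1 then cs.length
  else (PySem.Chars.findFrom cs ['#', '>'] (k : Int)).toNat + 2

-- A's end computation for a line comment: end = source.find("\n", k); -1 maps to length.
def pvLineEnd (cs : List Char) (k : Nat) : Nat :=
  if PySem.Chars.findFrom cs ['\n'] (k : Int) = -1 then cs.length
  else (PySem.Chars.findFrom cs ['\n'] (k : Int)).toNat

-- A's inner while loop for a single-quoted string, from index j (structural
-- recursion on the loop counter: j grows by ≥ 1 each iteration, so any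
-- counter ≥ cs.length - j runs the loop to its exit; the exit value is
-- cs.length in both base cases, exactly the while-else of A).
def pvASingle (cs : List Char) : Nat → Nat → Nat
  | 0, _ => cs.length
  | f+1, j =>
    if j < cs.length then
      if cs[j]? = some '\'' ∧ j + 1 < cs.length ∧ cs[j+1]? = some '\'' then
        pvASingle cs f (j+2)                     -- escaped ''
      else if cs[j]? = some '\'' then j + 1      -- closing quote, break
      else pvASingle cs f (j+1)
    else cs.length                               -- while-else: unterminated

-- A's inner while loop for a double-quoted string, from index j.
def pvADouble (cs : List Char) : Nat → Nat → Nat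
  | 0, _ => cs.length
  | f+1, j =>
    if j < cs.length then
      if cs[j]? = some '`' ∧ j + 1 < cs.length then
        pvADouble cs f (j+2)                     -- backtick escape
      else if cs[j]? = some '"' then j + 1       -- closing quote, break
      else pvADouble cs f (j+1)
    else cs.length

-- A's main while loop (same structural-recursion counter), appending regions.
def pvAMain (cs : List Char) : Nat → Nat → List (Int × Int) → List (Int × Int)
  | 0, _, regions => regions
  | f+1, i, regions =>
    if i < cs.length then
      if cs[i]? = some '<' ∧ i + 1 < cs.length ∧ cs[i+1]? = some '#' then
        let e := pvBlkEnd cs (i+2)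
        pvAMain cs f e (regions ++ [((i : Int), (e : Int))])
      else if cs[i]? = some '#' then
        let e := pvLineEnd cs i
        pvAMain cs f e (regions ++ [((i : Int), (e : Int))])
      else if cs[i]? = some '\'' then
        let j := pvASingle cs cs.length (i+1)
        pvAMain cs f j (regions ++ [((i : Int), (j : Int))])
      else if cs[i]? = some '"' then
        let j := pvADouble cs cs.length (i+1)
        pvAMain cs f j (regions ++ [((i : Int), (j : Int))])
      else pvAMain cs f (i+1) regions
    else regions

def build_protected_regions_py (source : String) : List (Int × Int) :=
  PySem.List.sorted (pvAMain source.toList (source.toList.length + 1) 0 [])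
    (fun r => r.1)   -- regions.sort(key=lambda r: r.start)

-- ===== PORT B =====
-- scanner state: which construct we are inside, and where it started
inductive PvSt where
  | normal
  | sawLt (p : Nat)      -- just saw '<' at p (potential block comment)
  | line (p : Nat)       -- line comment since p
  | block (p : Nat)      -- block comment since p
  | blockHash (p : Nat)  -- block comment, previous char was '#'
  | single (p : Nat)     -- single-quoted string since p
  | squote (p : Nat)     -- single-quoted string, previous char was '\''
  | double (p : Nat)     -- double-quoted string since p
  | tick (p : Nat)       -- double-quoted string, previous char was '`'
deriving DecidableEq, Repr

-- dispatch one character seen in normal text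
def pvNStep (c : Char) (pos : Nat) : PvSt :=
  if c = '<' then .sawLt pos
  else if c = '#' then .line pos
  else if c = '\'' then .single pos
  else if c = '"' then .double pos
  else .normal

def pvScan (cs : List Char) (pos : Nat) (st : PvSt) : List (Int × Int) :=
  match cs with
  | [] =>
    match st with
    | .normal | .sawLt _ => []
    | .line p | .block p | .blockHash p | .single p | .squote p | .double p | .tick p =>
        [((p : Int), (pos : Int))]
  | c :: rest =>
    match st with
    | .normal => pvScan rest (pos+1) (pvNStep c pos)
    | .sawLt p =>
        if c = '#' then pvScan rest (pos+1) (.block p)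
        else pvScan rest (pos+1) (pvNStep c pos)
    | .line p =>
        if c = '\n' then ((p : Int), (pos : Int)) :: pvScan rest (pos+1) (pvNStep c pos)
        else pvScan rest (pos+1) (.line p)
    | .block p =>
        if c = '#' then pvScan rest (pos+1) (.blockHash p)
        else pvScan rest (pos+1) (.block p)
    | .blockHash p =>
        if c = '>' then ((p : Int), ((pos : Int) + 1)) :: pvScan rest (pos+1) .normal
        else if c = '#' then pvScan rest (pos+1) (.blockHash p)
        else pvScan rest (pos+1) (.block p)
    | .single p =>
        if c = '\'' then pvScan rest (pos+1) (.squote p)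
        else pvScan rest (pos+1) (.single p)
    | .squote p =>
        if c = '\'' then pvScan rest (pos+1) (.single p)
        else ((p : Int), (pos : Int)) :: pvScan rest (pos+1) (pvNStep c pos)
    | .double p =>
        if c = '`' then pvScan rest (pos+1) (.tick p)
        else if c = '"' then ((p : Int), ((pos : Int) + 1)) :: pvScan rest (pos+1) .normal
        else pvScan rest (pos+1) (.double p)
    | .tick p => pvScan rest (pos+1) (.double p)

def build_protected_regions_py_alt (source : String) : List (Int × Int) :=
  pvScan source.toList 0 .normal

-- ===== PRECONDITION & SPEC =====
def Spec_build_protected_regions_py (source : String) (out : List (Int × Int)) : Prop := out = build_protected_regions_py_alt source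
instance (source : String) (out : List (Int × Int)) : Decidable (Spec_build_protected_regions_py source out) := by unfold Spec_build_protected_regions_py; infer_instance

-- ===== CLAIM (what is proved, stated in full; the proofs are below) =====
def Claim_equal_build_protected_regions_py : Prop := ∀ (source : String), Dom_build_protected_regions_py source → Spec_build_protected_regions_py source (build_protected_regions_py source)

-- ===== LEMMAS AND PROOFS =====


theorem pvBlkEnd_ge (cs : List Char) (k : Nat) (hk : k ≤ cs.length) : k ≤ pvBlkEnd cs k := by
  unfold pvBlkEnd
  by_cases hf : PySem.Chars.findFrom cs ['#', '>'] (k : Int) = -1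
  · simp [hf]; omega
  · have hs := PySem.Chars.findFrom_natCast_spec cs ['#', '>'] k hk hf
    simp [hf]; omega


theorem pvLineEnd_gt (cs : List Char) (k : Nat) (hk : k < cs.length)
    (hc : cs[k]? ≠ some '\n') : k < pvLineEnd cs k := by
  unfold pvLineEnd
  by_cases hf : PySem.Chars.findFrom cs ['\n'] (k : Int) = -1
  · simp [hf]; omega
  · have hs := PySem.Chars.findFrom_natCast_spec cs ['\n'] k (by omega) hf
    have hge : k ≤ (PySem.Chars.findFrom cs ['\n'] (k : Int)).toNat := by omega
    rcases Nat.lt_or_ge k (PySem.Chars.findFrom cs ['\n'] (k : Int)).toNat with h | h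
    · simp [hf]; omega
    · exfalso
      have heq : (PySem.Chars.findFrom cs ['\n'] (k : Int)).toNat = k := by omega
      have hpre := hs.2.1
      rw [heq] at hpre
      rw [List.drop_eq_getElem_cons hk] at hpre
      rw [List.cons_prefix_cons] at hpre
      rw [List.getElem?_eq_getElem hk] at hc
      exact hc (by rw [hpre.1])


-- A's main while loop, appending regions to the accumulator.
theorem pvBlkEnd_le (cs : List Char) (k : Nat) (hk : k ≤ cs.length) : pvBlkEnd cs k ≤ cs.length := by
  unfold pvBlkEnd
  by_cases hf : PySem.Chars.findFrom cs ['#', '>'] (k : Int) = -1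
  · simp [hf]
  · have hs := PySem.Chars.findFrom_natCast_spec cs ['#', '>'] k hk hf
    have hpre := hs.2.1
    have hlen := hpre.length_le
    simp only [List.length_drop, List.length_cons, List.length_nil] at hlen
    simp [hf]; omega

theorem pvLineEnd_le (cs : List Char) (k : Nat) (hk : k ≤ cs.length) : pvLineEnd cs k ≤ cs.length := by
  unfold pvLineEnd
  by_cases hf : PySem.Chars.findFrom cs ['\n'] (k : Int) = -1
  · simp [hf]
  · have hs := PySem.Chars.findFrom_natCast_spec cs ['\n'] k hk hf
    have hlen := hs.2.1.length_le
    simp only [List.length_drop, List.length_cons, List.length_nil] at hlen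
    simp [hf]; omega


theorem pvPrefix2_iff (cs : List Char) (k : Nat) :
    (['#', '>'] <+: cs.drop k) ↔ (k + 1 < cs.length ∧ cs[k]? = some '#' ∧ cs[k+1]? = some '>') := by
  constructor
  · intro h
    have hl := h.length_le
    simp only [List.length_drop, List.length_cons, List.length_nil] at hl
    have hk : k < cs.length := by omega
    have hk1 : k + 1 < cs.length := by omega
    rw [List.drop_eq_getElem_cons hk, List.drop_eq_getElem_cons hk1] at h
    rw [List.cons_prefix_cons, List.cons_prefix_cons] at h
    exact ⟨hk1, by simp [List.getElem?_eq_getElem hk, h.1.symm],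
      by simp [List.getElem?_eq_getElem hk1, h.2.1.symm]⟩
  · rintro ⟨hk1, h1, h2⟩
    have hk : k < cs.length := by omega
    rw [List.getElem?_eq_getElem hk] at h1
    rw [List.getElem?_eq_getElem hk1] at h2
    rw [List.drop_eq_getElem_cons hk, List.drop_eq_getElem_cons hk1]
    rw [List.cons_prefix_cons, List.cons_prefix_cons]
    simp_all

theorem pvPrefix1_iff (cs : List Char) (c : Char) (k : Nat) :
    ([c] <+: cs.drop k) ↔ (k < cs.length ∧ cs[k]? = some c) := by
  constructor
  · intro h
    have hl := h.length_le
    simp only [List.length_drop, List.length_cons, List.length_nil] at hl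
    have hk : k < cs.length := by omega
    rw [List.drop_eq_getElem_cons hk, List.cons_prefix_cons] at h
    exact ⟨hk, by simp [List.getElem?_eq_getElem hk, h.1.symm]⟩
  · rintro ⟨hk, h1⟩
    rw [List.getElem?_eq_getElem hk] at h1
    rw [List.drop_eq_getElem_cons hk, List.cons_prefix_cons]
    simp_all

-- one step of str.find(sub, k): no hit at k means the search starts at k+1
theorem pvFindStep (cs pat : List Char) (k : Nat) (hk : k < cs.length)
    (hno : ¬ pat <+: cs.drop k) :
    PySem.Chars.findFrom cs pat ((k : Nat) : Int) = PySem.Chars.findFrom cs pat ((k + 1 : Nat) : Int) := by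
  have hk' : k ≤ cs.length := le_of_lt hk
  have hk1 : k + 1 ≤ cs.length := hk
  by_cases h1 : PySem.Chars.findFrom cs pat ((k : Nat) : Int) = -1
  · have hno1 : ¬ pat <:+: cs.drop k :=
      (PySem.Chars.findFrom_natCast_eq_neg_one_iff cs pat k hk').mp h1
    have hno2 : ¬ pat <:+: cs.drop (k + 1) := by
      intro h
      exact hno1 (h.trans (by simpa using (List.drop_suffix 1 (cs.drop k)).isInfix))
    rw [h1, ((PySem.Chars.findFrom_natCast_eq_neg_one_iff cs pat (k+1) hk1).mpr hno2)]
  · have hs1 := PySem.Chars.findFrom_natCast_spec cs pat k hk' h1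
    have hpos1 : 0 ≤ PySem.Chars.findFrom cs pat ((k : Nat) : Int) :=
      le_trans (Int.natCast_nonneg k) hs1.1
    have hm1 : ((PySem.Chars.findFrom cs pat ((k : Nat) : Int)).toNat : Int) =
        PySem.Chars.findFrom cs pat ((k : Nat) : Int) := Int.toNat_of_nonneg hpos1
    have hne : (PySem.Chars.findFrom cs pat ((k : Nat) : Int)).toNat ≠ k := by
      intro he
      exact hno (he ▸ hs1.2.1)
    have hge1 : k + 1 ≤ (PySem.Chars.findFrom cs pat ((k : Nat) : Int)).toNat := by
      have : (k : Int) ≤ ((PySem.Chars.findFrom cs pat ((k : Nat) : Int)).toNat : Int) := by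
        rw [hm1]; exact hs1.1
      omega
    have h2 : PySem.Chars.findFrom cs pat ((k + 1 : Nat) : Int) ≠ -1 := by
      rw [Ne, PySem.Chars.findFrom_natCast_eq_neg_one_iff cs pat (k+1) hk1]
      intro hcon
      apply hcon
      have hpre := hs1.2.1
      have : pat <+: (cs.drop (k+1)).drop ((PySem.Chars.findFrom cs pat ((k : Nat) : Int)).toNat - (k+1)) := by
        rw [List.drop_drop]
        have : k + 1 + ((PySem.Chars.findFrom cs pat ((k : Nat) : Int)).toNat - (k+1)) =
            (PySem.Chars.findFrom cs pat ((k : Nat) : Int)).toNat := by omega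
        rw [this]; exact hpre
      exact this.isInfix.trans (List.drop_suffix _ _).isInfix
    have hs2 := PySem.Chars.findFrom_natCast_spec cs pat (k+1) hk1 h2
    have hpos2 : 0 ≤ PySem.Chars.findFrom cs pat ((k + 1 : Nat) : Int) :=
      le_trans (Int.natCast_nonneg (k+1)) hs2.1
    have hm2 : ((PySem.Chars.findFrom cs pat ((k + 1 : Nat) : Int)).toNat : Int) =
        PySem.Chars.findFrom cs pat ((k + 1 : Nat) : Int) := Int.toNat_of_nonneg hpos2
    have hge2 : k + 1 ≤ (PySem.Chars.findFrom cs pat ((k + 1 : Nat) : Int)).toNat := by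
      have : ((k + 1 : Nat) : Int) ≤ ((PySem.Chars.findFrom cs pat ((k + 1 : Nat) : Int)).toNat : Int) := by
        rw [hm2]; exact hs2.1
      omega
    have le1 : (PySem.Chars.findFrom cs pat ((k + 1 : Nat) : Int)).toNat ≤
        (PySem.Chars.findFrom cs pat ((k : Nat) : Int)).toNat := by
      by_contra hcon
      exact hs2.2.2 _ hge1 (by omega) hs1.2.1
    have le2 : (PySem.Chars.findFrom cs pat ((k : Nat) : Int)).toNat ≤
        (PySem.Chars.findFrom cs pat ((k + 1 : Nat) : Int)).toNat := by
      by_contra hcon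
      exact hs1.2.2 _ (by omega) (by omega) hs2.2.1
    omega

theorem pvBlkEnd_end (cs : List Char) : pvBlkEnd cs cs.length = cs.length := by
  unfold pvBlkEnd
  rw [(PySem.Chars.findFrom_natCast_eq_neg_one_iff cs ['#', '>'] cs.length le_rfl).mpr (by simp)]
  simp

theorem pvLineEnd_end (cs : List Char) : pvLineEnd cs cs.length = cs.length := by
  unfold pvLineEnd
  rw [(PySem.Chars.findFrom_natCast_eq_neg_one_iff cs ['\n'] cs.length le_rfl).mpr (by simp)]
  simp

theorem pvLineEnd_step (cs : List Char) (k : Nat) (hk : k < cs.length)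
    (hc : cs[k]? ≠ some '\n') : pvLineEnd cs k = pvLineEnd cs (k+1) := by
  unfold pvLineEnd
  rw [pvFindStep cs ['\n'] k hk (fun h => hc ((pvPrefix1_iff cs '\n' k).mp h).2)]

theorem pvLineEnd_hit (cs : List Char) (k : Nat) (hk : k < cs.length)
    (hc : cs[k]? = some '\n') : pvLineEnd cs k = k := by
  have hpre : ['\n'] <+: cs.drop k := (pvPrefix1_iff cs '\n' k).mpr ⟨hk, hc⟩
  have h1 : PySem.Chars.findFrom cs ['\n'] ((k : Nat) : Int) ≠ -1 := by
    rw [Ne, PySem.Chars.findFrom_natCast_eq_neg_one_iff cs ['\n'] k (le_of_lt hk)]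
    intro hcon; exact hcon hpre.isInfix
  have hs := PySem.Chars.findFrom_natCast_spec cs ['\n'] k (le_of_lt hk) h1
  have hle : (PySem.Chars.findFrom cs ['\n'] ((k : Nat) : Int)).toNat ≤ k := by
    by_contra hcon
    exact hs.2.2 k le_rfl (by omega) hpre
  have hpos : 0 ≤ PySem.Chars.findFrom cs ['\n'] ((k : Nat) : Int) :=
    le_trans (Int.natCast_nonneg k) hs.1
  have hge : k ≤ (PySem.Chars.findFrom cs ['\n'] ((k : Nat) : Int)).toNat := by
    have : (k : Int) ≤ ((PySem.Chars.findFrom cs ['\n'] ((k : Nat) : Int)).toNat : Int) := by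
      rw [Int.toNat_of_nonneg hpos]; exact hs.1
    omega
  unfold pvLineEnd
  simp [h1]; omega

-- end of a block comment seen from the blockHash state (previous char was '#')
def pvHshEnd (cs : List Char) (k : Nat) : Nat :=
  if k < cs.length ∧ cs[k]? = some '>' then k + 1 else pvBlkEnd cs k

theorem pvBlk_hit (cs : List Char) (k : Nat) (hk1 : k + 1 < cs.length)
    (h1 : cs[k]? = some '#') (h2 : cs[k+1]? = some '>') : pvBlkEnd cs k = k + 2 := by
  have hpre : ['#', '>'] <+: cs.drop k := (pvPrefix2_iff cs k).mpr ⟨hk1, h1, h2⟩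
  have hk : k ≤ cs.length := by omega
  have hne : PySem.Chars.findFrom cs ['#', '>'] ((k : Nat) : Int) ≠ -1 := by
    rw [Ne, PySem.Chars.findFrom_natCast_eq_neg_one_iff cs ['#', '>'] k hk]
    intro hcon; exact hcon hpre.isInfix
  have hs := PySem.Chars.findFrom_natCast_spec cs ['#', '>'] k hk hne
  have hle : (PySem.Chars.findFrom cs ['#', '>'] ((k : Nat) : Int)).toNat ≤ k := by
    by_contra hcon
    exact hs.2.2 k le_rfl (by omega) hpre
  have hpos : 0 ≤ PySem.Chars.findFrom cs ['#', '>'] ((k : Nat) : Int) :=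
    le_trans (Int.natCast_nonneg k) hs.1
  have hge : k ≤ (PySem.Chars.findFrom cs ['#', '>'] ((k : Nat) : Int)).toNat := by
    have : (k : Int) ≤ ((PySem.Chars.findFrom cs ['#', '>'] ((k : Nat) : Int)).toNat : Int) := by
      rw [Int.toNat_of_nonneg hpos]; exact hs.1
    omega
  unfold pvBlkEnd
  simp [hne]; omega

theorem pvBlk_nohash (cs : List Char) (k : Nat) (hk : k < cs.length)
    (hc : cs[k]? ≠ some '#') : pvBlkEnd cs k = pvBlkEnd cs (k+1) := by
  unfold pvBlkEnd
  rw [pvFindStep cs ['#', '>'] k hk (fun h => hc ((pvPrefix2_iff cs k).mp h).2.1)]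

theorem pvBlk_hsh (cs : List Char) (k : Nat) (hk : k < cs.length)
    (hc : cs[k]? = some '#') : pvBlkEnd cs k = pvHshEnd cs (k+1) := by
  unfold pvHshEnd
  by_cases h : k + 1 < cs.length ∧ cs[k+1]? = some '>'
  · rw [if_pos h, pvBlk_hit cs k h.1 hc h.2]
  · rw [if_neg h]
    have hstep := pvFindStep cs ['#', '>'] k hk
      (fun hp => h ⟨((pvPrefix2_iff cs k).mp hp).1, ((pvPrefix2_iff cs k).mp hp).2.2⟩)
    unfold pvBlkEnd
    rw [hstep]


theorem pvScan_line (cs : List Char) (p : Nat) :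
    ∀ fuel j, cs.length - j ≤ fuel → j ≤ cs.length →
    pvScan (cs.drop j) j (.line p) =
      ((p : Int), ((pvLineEnd cs j : Nat) : Int)) ::
        pvScan (cs.drop (pvLineEnd cs j)) (pvLineEnd cs j) .normal := by
  intro fuel
  induction fuel with
  | zero =>
    intro j hle hj
    have hj' : j = cs.length := by omega
    subst hj'
    rw [pvLineEnd_end]
    simp [pvScan]
  | succ f ih =>
    intro j hle hj
    by_cases hjl : j < cs.length
    · by_cases hq : cs[j] = '\n'
      · have hE : pvLineEnd cs j = j :=
          pvLineEnd_hit cs j hjl (by simp [List.getElem?_eq_getElem hjl, hq])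
        rw [hE]
        rw [List.drop_eq_getElem_cons hjl]
        simp [pvScan, hq]
      · have hE : pvLineEnd cs j = pvLineEnd cs (j+1) :=
          pvLineEnd_step cs j hjl (by simp [List.getElem?_eq_getElem hjl, hq])
        rw [hE, List.drop_eq_getElem_cons hjl]
        simp only [pvScan, hq]
        exact ih (j+1) (by omega) (by omega)
    · have hj' : j = cs.length := by omega
      subst hj'
      rw [pvLineEnd_end]
      simp [pvScan]

theorem pvScan_block (cs : List Char) (p : Nat) :
    ∀ fuel j, cs.length - j ≤ fuel → j ≤ cs.length →
    (pvScan (cs.drop j) j (.block p) =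
      ((p : Int), ((pvBlkEnd cs j : Nat) : Int)) ::
        pvScan (cs.drop (pvBlkEnd cs j)) (pvBlkEnd cs j) .normal)
    ∧ (pvScan (cs.drop j) j (.blockHash p) =
      ((p : Int), ((pvHshEnd cs j : Nat) : Int)) ::
        pvScan (cs.drop (pvHshEnd cs j)) (pvHshEnd cs j) .normal) := by
  intro fuel
  induction fuel with
  | zero =>
    intro j hle hj
    have hj' : j = cs.length := by omega
    subst hj'
    have hH : pvHshEnd cs cs.length = cs.length := by
      unfold pvHshEnd
      rw [if_neg (by simp), pvBlkEnd_end]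
    rw [pvBlkEnd_end, hH]
    simp [pvScan]
  | succ f ih =>
    intro j hle hj
    by_cases hjl : j < cs.length
    · have hget : cs[j]? = some cs[j] := List.getElem?_eq_getElem hjl
      constructor
      · rw [List.drop_eq_getElem_cons hjl]
        by_cases hq : cs[j] = '#'
        · have hE : pvBlkEnd cs j = pvHshEnd cs (j+1) :=
            pvBlk_hsh cs j hjl (by simp [hget, hq])
          simp only [pvScan, hq, if_pos]
          rw [hE]
          exact (ih (j+1) (by omega) (by omega)).2
        · have hE : pvBlkEnd cs j = pvBlkEnd cs (j+1) :=
            pvBlk_nohash cs j hjl (by simp [hget, hq])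
          simp only [pvScan, hq]
          rw [hE]
          exact (ih (j+1) (by omega) (by omega)).1
      · rw [List.drop_eq_getElem_cons hjl]
        by_cases hq : cs[j] = '>'
        · have hE : pvHshEnd cs j = j + 1 := by
            unfold pvHshEnd
            rw [if_pos ⟨hjl, by simp [hget, hq]⟩]
          simp only [pvScan, hq, if_pos]
          rw [hE]
          simp
        · by_cases hq2 : cs[j] = '#'
          · have hE : pvHshEnd cs j = pvHshEnd cs (j+1) := by
              unfold pvHshEnd
              rw [if_neg (by simp [hget, hq])]
              exact pvBlk_hsh cs j hjl (by simp [hget, hq2])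
            simp only [pvScan, hq2, if_pos]
            rw [hE]
            exact (ih (j+1) (by omega) (by omega)).2
          · have hE : pvHshEnd cs j = pvBlkEnd cs (j+1) := by
              unfold pvHshEnd
              rw [if_neg (by simp [hget, hq])]
              exact pvBlk_nohash cs j hjl (by simp [hget, hq2])
            simp only [pvScan, hq, hq2]
            rw [hE]
            exact (ih (j+1) (by omega) (by omega)).1
    · have hj' : j = cs.length := by omega
      subst hj'
      have hH : pvHshEnd cs cs.length = cs.length := by
        unfold pvHshEnd
        rw [if_neg (by simp), pvBlkEnd_end]
      rw [pvBlkEnd_end, hH]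
      simp [pvScan]
theorem pvASingle_le (cs : List Char) (f j : Nat) : pvASingle cs f j ≤ cs.length := by
  induction f generalizing j with
  | zero => simp [pvASingle]
  | succ f ih =>
    simp only [pvASingle]
    split_ifs with h1 h2 h3
    · exact ih (j+2)
    · omega
    · exact ih (j+1)
    · omega

theorem pvASingle_ge (cs : List Char) (f j : Nat) (h : cs.length - j ≤ f) :
    min (j+1) cs.length ≤ pvASingle cs f j := by
  induction f generalizing j with
  | zero => simp only [pvASingle]; omega
  | succ f ih =>
    simp only [pvASingle]
    split_ifs with h1 h2 h3
    · have := ih (j+2) (by omega); omega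
    · omega
    · have := ih (j+1) (by omega); omega
    · omega

theorem pvADouble_le (cs : List Char) (f j : Nat) : pvADouble cs f j ≤ cs.length := by
  induction f generalizing j with
  | zero => simp [pvADouble]
  | succ f ih =>
    simp only [pvADouble]
    split_ifs with h1 h2 h3
    · exact ih (j+2)
    · omega
    · exact ih (j+1)
    · omega

theorem pvADouble_ge (cs : List Char) (f j : Nat) (h : cs.length - j ≤ f) :
    min (j+1) cs.length ≤ pvADouble cs f j := by
  induction f generalizing j with
  | zero => simp only [pvADouble]; omega
  | succ f ih =>
    simp only [pvADouble]
    split_ifs with h1 h2 h3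
    · have := ih (j+2) (by omega); omega
    · omega
    · have := ih (j+1) (by omega); omega
    · omega

theorem pvScan_single (cs : List Char) (p : Nat) :
    ∀ f j, cs.length - j ≤ f → j ≤ cs.length →
    pvScan (cs.drop j) j (.single p) =
      ((p : Int), ((pvASingle cs f j : Nat) : Int)) ::
        pvScan (cs.drop (pvASingle cs f j)) (pvASingle cs f j) .normal := by
  intro f
  induction f with
  | zero =>
    intro j hle hj
    have hj' : j = cs.length := by omega
    subst hj'
    simp [pvASingle, pvScan]
  | succ f ih =>
    intro j hle hj
    by_cases hjl : j < cs.length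
    · rw [List.drop_eq_getElem_cons hjl]
      by_cases hq : cs[j] = '\''
      · simp only [pvScan, hq, if_pos]
        by_cases h2 : j + 1 < cs.length
        · rw [List.drop_eq_getElem_cons h2]
          by_cases hq2 : cs[j+1] = '\''
          · have hA : pvASingle cs (f+1) j = pvASingle cs f (j+2) := by
              simp [pvASingle, hjl, h2, hq, hq2]
            simp only [pvScan, hq2, if_pos]
            rw [hA]
            have he : j + 1 + 1 = j + 2 := by omega
            rw [he]
            exact ih (j+2) (by omega) (by omega)
          · have hA : pvASingle cs (f+1) j = j + 1 := by
              simp [pvASingle, hjl, h2, hq, hq2]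
            simp only [pvScan, hq2]
            rw [hA, List.drop_eq_getElem_cons h2]
            simp [pvScan]
        · have hA : pvASingle cs (f+1) j = j + 1 := by
            simp [pvASingle, hjl, h2, hq]
          have hnil : cs.drop (j+1) = [] := by
            apply List.drop_eq_nil_of_le; omega
          rw [hA, hnil]
          simp [pvScan]
      · have hA : pvASingle cs (f+1) j = pvASingle cs f (j+1) := by
          simp [pvASingle, hjl, hq]
        simp only [pvScan, hq]
        rw [hA]
        exact ih (j+1) (by omega) (by omega)
    · have hj' : j = cs.length := by omega
      subst hj'
      have hA : pvASingle cs (f+1) cs.length = cs.length := by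
        simp [pvASingle]
      rw [hA]
      simp [pvScan]

theorem pvScan_double (cs : List Char) (p : Nat) :
    ∀ f j, cs.length - j ≤ f → j ≤ cs.length →
    pvScan (cs.drop j) j (.double p) =
      ((p : Int), ((pvADouble cs f j : Nat) : Int)) ::
        pvScan (cs.drop (pvADouble cs f j)) (pvADouble cs f j) .normal := by
  intro f
  induction f with
  | zero =>
    intro j hle hj
    have hj' : j = cs.length := by omega
    subst hj'
    simp [pvADouble, pvScan]
  | succ f ih =>
    intro j hle hj
    by_cases hjl : j < cs.length
    · rw [List.drop_eq_getElem_cons hjl]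
      by_cases hq : cs[j] = '`'
      · simp only [pvScan, hq, if_pos]
        by_cases h2 : j + 1 < cs.length
        · rw [List.drop_eq_getElem_cons h2]
          have hA : pvADouble cs (f+1) j = pvADouble cs f (j+2) := by
            simp [pvADouble, hjl, h2, hq]
          simp only [pvScan]
          rw [hA]
          have he : j + 1 + 1 = j + 2 := by omega
          rw [he]
          exact ih (j+2) (by omega) (by omega)
        · have hA : pvADouble cs (f+1) j = pvADouble cs f (j+1) := by
            simp [pvADouble, hjl, h2, hq]
          have hA2 : pvADouble cs f (j+1) = cs.length := by
            cases f <;> simp [pvADouble, h2]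
          have hnil : cs.drop (j+1) = [] := by
            apply List.drop_eq_nil_of_le; omega
          rw [hA, hA2, hnil]
          simp [pvScan]
          omega
      · by_cases hq2 : cs[j] = '"'
        · have hA : pvADouble cs (f+1) j = j + 1 := by
            simp [pvADouble, hjl, hq2]
          simp only [pvScan, hq2, if_pos]
          rw [hA]
          simp
        · have hA : pvADouble cs (f+1) j = pvADouble cs f (j+1) := by
            simp [pvADouble, hjl, hq, hq2]
          simp only [pvScan, hq, hq2]
          rw [hA]
          exact ih (j+1) (by omega) (by omega)
    · have hj' : j = cs.length := by omega
      subst hj'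
      have hA : pvADouble cs (f+1) cs.length = cs.length := by
        simp [pvADouble]
      rw [hA]
      simp [pvScan]

theorem pvAMain_append (cs : List Char) :
    ∀ f i acc, pvAMain cs f i acc = acc ++ pvAMain cs f i [] := by
  intro f
  induction f with
  | zero => intro i acc; simp [pvAMain]
  | succ f ih =>
    intro i acc
    by_cases hi : i < cs.length
    · simp only [pvAMain]
      split_ifs with hb hl hs hd
      · rw [ih _ (acc ++ _), ih _ ([] ++ _)]; simp
      · rw [ih _ (acc ++ _), ih _ ([] ++ _)]; simp
      · rw [ih _ (acc ++ _), ih _ ([] ++ _)]; simp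
      · rw [ih _ (acc ++ _), ih _ ([] ++ _)]; simp
      · exact ih (i+1) acc
    · simp [pvAMain, hi]

theorem pv_main_eq_scan_aux (cs : List Char) :
    ∀ f i, cs.length - i ≤ f → i ≤ cs.length →
    pvAMain cs f i [] = pvScan (cs.drop i) i .normal := by
  intro f
  induction f with
  | zero =>
    intro i hle hi
    have hi' : i = cs.length := by omega
    subst hi'
    simp [pvAMain, pvScan]
  | succ f ih =>
    intro i hle hi
    by_cases hil : i < cs.length
    · have hget : cs[i]? = some cs[i] := List.getElem?_eq_getElem hil
      simp only [pvAMain]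
      rw [if_pos hil]
      by_cases hb : cs[i]? = some '<' ∧ i + 1 < cs.length ∧ cs[i+1]? = some '#'
      · -- block comment
        rw [if_pos hb]
        obtain ⟨hb1, hb2, hb3⟩ := hb
        have hc : cs[i] = '<' := Option.some.inj (hget ▸ hb1)
        have hc2 : cs[i+1] = '#' := Option.some.inj ((List.getElem?_eq_getElem hb2) ▸ hb3)
        have hge := pvBlkEnd_ge cs (i+2) (by omega)
        have hleE := pvBlkEnd_le cs (i+2) (by omega)
        rw [pvAMain_append cs f _ _]
        rw [ih (pvBlkEnd cs (i+2)) (by omega) (by omega)]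
        rw [List.drop_eq_getElem_cons hil]
        simp only [pvScan, pvNStep, hc, Char.reduceEq, reduceIte]
        rw [List.drop_eq_getElem_cons hb2]
        simp only [pvScan, hc2, reduceIte]
        have he : i + 1 + 1 = i + 2 := by omega
        rw [he]
        rw [(pvScan_block cs i (f+1) (i+2) (by omega) (by omega)).1]
        simp
      · rw [if_neg hb]
        by_cases hl : cs[i]? = some '#'
        · -- line comment
          rw [if_pos hl]
          have hc : cs[i] = '#' := Option.some.inj (hget ▸ hl)
          have hgt := pvLineEnd_gt cs i hil (by rw [hget]; simp [hc])
          have hleE := pvLineEnd_le cs i (by omega)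
          have hstep : pvLineEnd cs i = pvLineEnd cs (i+1) :=
            pvLineEnd_step cs i hil (by rw [hget]; simp [hc])
          rw [pvAMain_append cs f _ _]
          rw [ih (pvLineEnd cs i) (by omega) (by omega)]
          rw [List.drop_eq_getElem_cons hil]
          simp only [pvScan, pvNStep, hc, Char.reduceEq, reduceIte]
          rw [pvScan_line cs i (f+1) (i+1) (by omega) (by omega), ← hstep]
          simp
        · rw [if_neg hl]
          by_cases hs : cs[i]? = some '\''
          · -- single-quoted string
            rw [if_pos hs]
            have hc : cs[i] = '\'' := Option.some.inj (hget ▸ hs)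
            have hge := pvASingle_ge cs cs.length (i+1) (by omega)
            have hleE := pvASingle_le cs cs.length (i+1)
            rw [pvAMain_append cs f _ _]
            rw [ih (pvASingle cs cs.length (i+1)) (by omega) (by omega)]
            rw [List.drop_eq_getElem_cons hil]
            simp only [pvScan, pvNStep, hc, Char.reduceEq, reduceIte]
            rw [pvScan_single cs i cs.length (i+1) (by omega) (by omega)]
            simp
          · rw [if_neg hs]
            by_cases hd : cs[i]? = some '"'
            · -- double-quoted string
              rw [if_pos hd]
              have hc : cs[i] = '"' := Option.some.inj (hget ▸ hd)
              have hge := pvADouble_ge cs cs.length (i+1) (by omega)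
              have hleE := pvADouble_le cs cs.length (i+1)
              rw [pvAMain_append cs f _ _]
              rw [ih (pvADouble cs cs.length (i+1)) (by omega) (by omega)]
              rw [List.drop_eq_getElem_cons hil]
              simp only [pvScan, pvNStep, hc, Char.reduceEq, reduceIte]
              rw [pvScan_double cs i cs.length (i+1) (by omega) (by omega)]
              simp
            · -- ordinary character
              rw [if_neg hd]
              rw [ih (i+1) (by omega) (by omega)]
              rw [List.drop_eq_getElem_cons hil]
              by_cases hc : cs[i] = '<'
              · -- '<' not followed by '#'
                simp only [pvScan, pvNStep, hc, Char.reduceEq, reduceIte]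
                by_cases h2 : i + 1 < cs.length
                · have hc2 : cs[i+1] ≠ '#' := by
                    intro hE
                    exact hb ⟨by simp [hget, hc], h2, by simp [List.getElem?_eq_getElem h2, hE]⟩
                  rw [List.drop_eq_getElem_cons h2]
                  simp only [pvScan, hc2]
                  simp
                · have hnil : cs.drop (i+1) = [] := by
                    apply List.drop_eq_nil_of_le; omega
                  rw [hnil]
                  simp [pvScan]
              · have hn : pvNStep cs[i] i = .normal := by
                  unfold pvNStep
                  rw [if_neg hc, if_neg (by intro hE; exact hl (by simp [hget, hE])),
                      if_neg (by intro hE; exact hs (by simp [hget, hE])),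
                      if_neg (by intro hE; exact hd (by simp [hget, hE]))]
                simp only [pvScan, hn]
    · have hi' : i = cs.length := by omega
      subst hi'
      simp [pvAMain, pvScan]

theorem pv_main_sorted_aux (cs : List Char) :
    ∀ f i, cs.length - i ≤ f → i ≤ cs.length →
    (pvAMain cs f i []).Pairwise (fun a b => a.1 < b.1) ∧
      ∀ r ∈ pvAMain cs f i [], (i : Int) ≤ r.1 := by
  intro f
  induction f with
  | zero =>
    intro i hle hi
    simp [pvAMain]
  | succ f ih =>
    intro i hle hi
    by_cases hil : i < cs.length
    · simp only [pvAMain]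
      rw [if_pos hil]
      split_ifs with hb hl hs hd
      · have hge := pvBlkEnd_ge cs (i+2) (by omega)
        have hleE := pvBlkEnd_le cs (i+2) (by omega)
        rw [pvAMain_append cs f _ _]
        obtain ⟨hpw, hbd⟩ := ih (pvBlkEnd cs (i+2)) (by omega) (by omega)
        refine ⟨?_, ?_⟩ <;> simp only [List.nil_append, List.singleton_append]
        · exact List.Pairwise.cons (fun r hr => by have := hbd r hr; simp at this ⊢; omega) hpw
        · intro r hr
          rw [List.mem_cons] at hr
          rcases hr with rfl | hr
          · simp
          · have := hbd r hr; simp at this ⊢; omega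
      · have hgt := pvLineEnd_gt cs i hil
          (by rw [List.getElem?_eq_getElem hil] at hl ⊢; intro hE; simp [hE] at hl)
        have hleE := pvLineEnd_le cs i (by omega)
        rw [pvAMain_append cs f _ _]
        obtain ⟨hpw, hbd⟩ := ih (pvLineEnd cs i) (by omega) (by omega)
        refine ⟨?_, ?_⟩ <;> simp only [List.nil_append, List.singleton_append]
        · exact List.Pairwise.cons (fun r hr => by have := hbd r hr; simp at this ⊢; omega) hpw
        · intro r hr
          rw [List.mem_cons] at hr
          rcases hr with rfl | hr
          · simp
          · have := hbd r hr; simp at this ⊢; omega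
      · have hge := pvASingle_ge cs cs.length (i+1) (by omega)
        have hleE := pvASingle_le cs cs.length (i+1)
        rw [pvAMain_append cs f _ _]
        obtain ⟨hpw, hbd⟩ := ih (pvASingle cs cs.length (i+1)) (by omega) (by omega)
        refine ⟨?_, ?_⟩ <;> simp only [List.nil_append, List.singleton_append]
        · exact List.Pairwise.cons (fun r hr => by have := hbd r hr; simp at this ⊢; omega) hpw
        · intro r hr
          rw [List.mem_cons] at hr
          rcases hr with rfl | hr
          · simp
          · have := hbd r hr; simp at this ⊢; omega
      · have hge := pvADouble_ge cs cs.length (i+1) (by omega)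
        have hleE := pvADouble_le cs cs.length (i+1)
        rw [pvAMain_append cs f _ _]
        obtain ⟨hpw, hbd⟩ := ih (pvADouble cs cs.length (i+1)) (by omega) (by omega)
        refine ⟨?_, ?_⟩ <;> simp only [List.nil_append, List.singleton_append]
        · exact List.Pairwise.cons (fun r hr => by have := hbd r hr; simp at this ⊢; omega) hpw
        · intro r hr
          rw [List.mem_cons] at hr
          rcases hr with rfl | hr
          · simp
          · have := hbd r hr; simp at this ⊢; omega
      · obtain ⟨hpw, hbd⟩ := ih (i+1) (by omega) (by omega)
        exact ⟨hpw, fun r hr => by have := hbd r hr; omega⟩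
    · have hi' : i = cs.length := by omega
      subst hi'
      simp [pvAMain]


-- ===== VERDICT (by name: the statement is the Claim_ definition above) =====
theorem build_protected_regions_py_spec : Claim_equal_build_protected_regions_py := by
  intro source _
  show build_protected_regions_py source = build_protected_regions_py_alt source
  unfold build_protected_regions_py build_protected_regions_py_alt
  rw [PySem.List.sorted_eq_of_perm_of_pairwise_lt _ _ _ (List.Perm.refl _)
        (pv_main_sorted_aux source.toList (source.toList.length + 1) 0 (by omega) (by omega)).1]
  simpa using pv_main_eq_scan_aux source.toList (source.toList.length + 1) 0 (by omega) (by omega)
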